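-- pv_equiv track=rewrite | github.com/Whoami666/HSE | Exam_task2.py | lost_victory
-- ===== SOURCE A (Python) =====
-- def lost_victory(home_team_goal_count, away_team_goal_count, home_team_goal_timings, away_team_goal_timings):
--     home_flag, away_flag = 0, 0
--     home_counter, away_counter = 0, 0
--     if home_team_goal_count == 0 or away_team_goal_count == 0:
--         return False
--     else:
--         all_timings = home_team_goal_timings + away_team_goal_timings
--         all_timings.sort()
--         for i in range(len(all_timings)):
--             if all_timings[0] in home_team_goal_timings:
--                 home_counter += 1
--             else:
--                 away_counter += 1
--         if home_counter > away_counter: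
--             home_flag = 1
--         elif away_counter > home_counter:
--             away_flag = 1
--     if (home_team_goal_count > away_team_goal_count or home_team_goal_count == away_team_goal_count) and away_flag == 1:
--         return True
--     elif (home_team_goal_count < away_team_goal_count or home_team_goal_count < away_team_goal_count) and home_flag == 1:
--         return True
--     else:
--         return False
-- ===== SOURCE B (Python) =====
-- def lost_victory(home_team_goal_count, away_team_goal_count, home_team_goal_timings, away_team_goal_timings):
--     if home_team_goal_count == 0 or away_team_goal_count == 0:
--         return False
--     all_timings = home_team_goal_timings + away_team_goal_timings
--     if not all_timings:
--         return False
--     first_is_home = min(all_timings) in home_team_goal_timings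
--     if home_team_goal_count >= away_team_goal_count:
--         return not first_is_home
--     return first_is_home
-- ===== Notes on version B (the rewrite author's own statement) =====
-- stated objective: simpler
-- what changed: A sorts the combined timings and runs an n-iteration counting loop whose condition (sorted[0] in home list) never changes; B drops the sort and the loop entirely, taking min of the combined list once, testing its membership once, and returning the comparison of the counts against that single flag directly.
import Mathlib
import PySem

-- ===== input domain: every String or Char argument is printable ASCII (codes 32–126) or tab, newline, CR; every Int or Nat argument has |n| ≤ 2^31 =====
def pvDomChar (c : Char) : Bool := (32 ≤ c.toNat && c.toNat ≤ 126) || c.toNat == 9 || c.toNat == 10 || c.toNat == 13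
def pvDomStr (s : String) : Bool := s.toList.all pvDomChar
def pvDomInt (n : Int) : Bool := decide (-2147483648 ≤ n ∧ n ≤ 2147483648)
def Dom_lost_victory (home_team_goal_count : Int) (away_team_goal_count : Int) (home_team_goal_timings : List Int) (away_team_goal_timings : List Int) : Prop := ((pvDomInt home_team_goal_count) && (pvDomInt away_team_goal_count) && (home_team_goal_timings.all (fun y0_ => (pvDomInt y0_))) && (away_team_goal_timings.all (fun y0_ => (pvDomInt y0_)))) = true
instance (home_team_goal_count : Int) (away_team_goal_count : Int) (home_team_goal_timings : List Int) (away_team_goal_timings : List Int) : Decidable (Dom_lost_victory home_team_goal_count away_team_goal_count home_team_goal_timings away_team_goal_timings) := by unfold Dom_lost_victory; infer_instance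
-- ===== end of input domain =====

-- ===== PORT A =====
-- B replaces A's sort + constant-condition counting loop by a single min + membership test (objective: simpler).
def lost_victory (home_team_goal_count : Int) (away_team_goal_count : Int) (home_team_goal_timings : List Int) (away_team_goal_timings : List Int) : Bool :=
  if home_team_goal_count == 0 || away_team_goal_count == 0 then false
  else
    let all_timings := PySem.List.sorted (home_team_goal_timings ++ away_team_goal_timings) (fun x => x) false
    -- all_timings[0]: the loop body only executes when all_timings is nonempty, so headD is exact there
    let counters : Int × Int :=
      (PySem.List.pyRange 0 (all_timings.length : Int) 1).foldl
        (fun st _ =>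
          if home_team_goal_timings.contains (all_timings.headD 0) then (st.1 + 1, st.2)
          else (st.1, st.2 + 1)) (0, 0)
    let home_flag : Int := if counters.1 > counters.2 then 1 else 0
    let away_flag : Int := if counters.2 > counters.1 then 1 else 0
    if (home_team_goal_count > away_team_goal_count || home_team_goal_count == away_team_goal_count) && away_flag == 1 then true
    else if (home_team_goal_count < away_team_goal_count || home_team_goal_count < away_team_goal_count) && home_flag == 1 then true
    else false

-- ===== PORT B =====
def lost_victory_alt (home_team_goal_count : Int) (away_team_goal_count : Int) (home_team_goal_timings : List Int) (away_team_goal_timings : List Int) : Bool :=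
  if home_team_goal_count == 0 || away_team_goal_count == 0 then false
  else
    let all_timings := home_team_goal_timings ++ away_team_goal_timings
    if all_timings.isEmpty then false
    else
      let first_is_home :=
        match PySem.List.min? all_timings (fun x => x) with
        | some m => home_team_goal_timings.contains m
        | none => false
      if home_team_goal_count >= away_team_goal_count then !first_is_home
      else first_is_home

-- ===== PRECONDITION & SPEC =====
def Spec_lost_victory (home_team_goal_count : Int) (away_team_goal_count : Int) (home_team_goal_timings : List Int) (away_team_goal_timings : List Int) (out : Bool) : Prop := out = lost_victory_alt home_team_goal_count away_team_goal_count home_team_goal_timings away_team_goal_timings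
instance (home_team_goal_count : Int) (away_team_goal_count : Int) (home_team_goal_timings : List Int) (away_team_goal_timings : List Int) (out : Bool) : Decidable (Spec_lost_victory home_team_goal_count away_team_goal_count home_team_goal_timings away_team_goal_timings out) := by unfold Spec_lost_victory; infer_instance

-- ===== CLAIM (what is proved, stated in full; the proofs are below) =====
def Claim_equal_lost_victory : Prop := ∀ (home_team_goal_count : Int) (away_team_goal_count : Int) (home_team_goal_timings : List Int) (away_team_goal_timings : List Int), Dom_lost_victory home_team_goal_count away_team_goal_count home_team_goal_timings away_team_goal_timings → Spec_lost_victory home_team_goal_count away_team_goal_count home_team_goal_timings away_team_goal_timings (lost_victory home_team_goal_count away_team_goal_count home_team_goal_timings away_team_goal_timings)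

-- ===== LEMMAS AND PROOFS =====

-- the counting loop once its (iteration-independent) condition is fixed
theorem foldl_inc_fst (l : List Int) (p q : Int) :
    l.foldl (fun (st : Int × Int) (_ : Int) => (st.1 + 1, st.2)) (p, q) = (p + l.length, q) := by
  induction l generalizing p with
  | nil => simp
  | cons x t ih => simp only [List.foldl_cons, ih, List.length_cons]; push_cast; ring_nf

theorem foldl_inc_snd (l : List Int) (p q : Int) :
    l.foldl (fun (st : Int × Int) (_ : Int) => (st.1, st.2 + 1)) (p, q) = (p, q + l.length) := by
  induction l generalizing q with
  | nil => simp
  | cons x t ih => simp only [List.foldl_cons, ih, List.length_cons]; push_cast; ring_nf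

-- head of the identity-sorted nonempty list is the value min? returns
theorem head_sorted_eq_min (xs : List Int) (m : Int)
    (hm : PySem.List.min? xs (fun x => x) = some m) :
    (PySem.List.sorted xs (fun x => x) false).headD 0 = m := by
  have hne : xs ≠ [] := by
    intro h; rw [h] at hm; simp [PySem.List.min?] at hm
  obtain ⟨h0, t, hs⟩ : ∃ h0 t, PySem.List.sorted xs (fun x => x) false = h0 :: t := by
    cases hsort : PySem.List.sorted xs (fun x => x) false with
    | nil => exact absurd ((PySem.List.sorted_eq_nil_iff xs _ _).mp hsort) hne
    | cons h0 t => exact ⟨h0, t, rfl⟩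
  have hmem : h0 ∈ xs := by
    have := PySem.List.mem_sorted xs (fun x => x) false h0
    rw [hs] at this; exact this.mp (by simp)
  have h1 : h0 ≤ m := PySem.List.key_head_sorted_le xs (fun x => x) hs m (PySem.List.min?_mem hm)
  have h2 : m ≤ h0 := PySem.List.min?_isMin hm h0 hmem
  rw [hs]; simp; omega

theorem lost_victory_eq (home_team_goal_count : Int) (away_team_goal_count : Int) (home_team_goal_timings : List Int) (away_team_goal_timings : List Int) :
    lost_victory home_team_goal_count away_team_goal_count home_team_goal_timings away_team_goal_timings
      = lost_victory_alt home_team_goal_count away_team_goal_count home_team_goal_timings away_team_goal_timings := by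
  simp only [lost_victory, lost_victory_alt]
  cases hz : (home_team_goal_count == 0 || away_team_goal_count == 0) with
  | true => simp
  | false =>
    simp only [Bool.false_eq_true, if_false]
    by_cases hnil : home_team_goal_timings ++ away_team_goal_timings = []
    · simp [hnil, PySem.List.sorted, PySem.List.pyRange]
    · cases hm0 : PySem.List.min? (home_team_goal_timings ++ away_team_goal_timings) (fun x => x) with
      | none => exact absurd ((PySem.List.min?_eq_none_iff _ _).mp hm0) hnil
      | some m =>
        have hhead : (PySem.List.sorted (home_team_goal_timings ++ away_team_goal_timings) (fun x => x) false).headD 0 = m :=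
          head_sorted_eq_min _ m hm0
        have hpos : 0 < (home_team_goal_timings ++ away_team_goal_timings).length :=
          List.length_pos_iff.mpr hnil
        have hlen : (PySem.List.sorted (home_team_goal_timings ++ away_team_goal_timings) (fun x => x) false).length
            = (home_team_goal_timings ++ away_team_goal_timings).length :=
          PySem.List.length_sorted _ _ _
        have hlenr : (PySem.List.pyRange 0 ((home_team_goal_timings ++ away_team_goal_timings).length : Int) 1).length
            = (home_team_goal_timings ++ away_team_goal_timings).length := by
          rw [PySem.List.pyRange_zero_natCast]; simp
        simp only [hhead, hlen]
        have hS : (0:Int) < (home_team_goal_timings.length : Int) + (away_team_goal_timings.length : Int) := by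
          rw [List.length_append] at hpos; omega
        have hb : (!decide (home_team_goal_timings = []) || !decide (away_team_goal_timings = [])) = true := by
          cases home_team_goal_timings with
          | nil =>
            cases away_team_goal_timings with
            | nil => exact absurd rfl hnil
            | cons _ _ => simp
          | cons _ _ => simp
        cases hc : home_team_goal_timings.contains m <;>
          simp [foldl_inc_fst, foldl_inc_snd, hb, hS] <;>
          rw [Bool.eq_iff_iff] <;> simp <;> omega

-- ===== VERDICT (by name: the statement is the Claim_ definition above) =====
theorem lost_victory_spec : Claim_equal_lost_victory := by
  intro h a ht aw _
  unfold Spec_lost_victory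
  exact lost_victory_eq h a ht aw
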